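-- pv_equiv track=rewrite | github.com/uservan/cross_domain | verl/verl/utils/reward_score/puzzle_tasks/tic_tac_toe/verifier.py | count_forks
-- ===== SOURCE A (Python) =====
-- def count_forks(board, player, win_length):
--     """
--     Count the number of "forks" (multiple threats) the player can form
--     """
--     size = len(board)
--     fork_count = 0
--
--     # Try placing the player's piece in each empty cell, check if it forms multiple threats
--     for i in range(size):
--         for j in range(size):
--             if board[i][j] == "":
--                 board[i][j] = player
--                 threat_lines = 0
--
--                 # Check row threats
--                 for row in range(size):
--                     for col in range(size - win_length + 1):
--                         line = [board[row][col+k] for k in range(win_length)]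
--                         empty_count = line.count("")
--                         player_count = line.count(player)
--                         if empty_count == 1 and player_count == win_length - 1:
--                             threat_lines += 1
--
--                 # Check column threats
--                 for col in range(size):
--                     for row in range(size - win_length + 1):
--                         line = [board[row+k][col] for k in range(win_length)]
--                         empty_count = line.count("")
--                         player_count = line.count(player)
--                         if empty_count == 1 and player_count == win_length - 1:
--                             threat_lines += 1
--
--                 # Check main diagonal threats
--                 for row in range(size - win_length + 1):
--                     for col in range(size - win_length + 1):
--                         line = [board[row+k][col+k] for k in range(win_length)]
--                         empty_count = line.count("")
--                         player_count = line.count(player)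
--                         if empty_count == 1 and player_count == win_length - 1:
--                             threat_lines += 1
--
--                 # Check anti-diagonal threats
--                 for row in range(size - win_length + 1):
--                     for col in range(win_length - 1, size):
--                         line = [board[row+k][col-k] for k in range(win_length)]
--                         empty_count = line.count("")
--                         player_count = line.count(player)
--                         if empty_count == 1 and player_count == win_length - 1:
--                             threat_lines += 1
--
--                 # If there are multiple threat lines, count as one fork
--                 if threat_lines >= 2:
--                     fork_count += 1
--
--                 board[i][j] = ""  # Restore the board
--
--     return fork_count
-- ===== SOURCE B (Python) =====
-- def count_forks(board, player, win_length):
--     """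
--     Count the number of "forks" (multiple threats) the player can form.
--
--     Precompute every window (row/column/diagonal/anti-diagonal segment of
--     length win_length) once, the threat status of each window on the current
--     board, and an index of the windows passing through each cell.  Placing a
--     piece in an empty cell only changes the status of windows through that
--     cell, so per empty cell we re-evaluate just those windows.
--     """
--     size = len(board)
--     w = win_length
--     empties = [(i, j) for i in range(size) for j in range(size)
--                if board[i][j] == ""]
--     if not empties:
--         return 0
--
--     windows = (
--         [[(r, c + k) for k in range(w)]
--          for r in range(size) for c in range(size - w + 1)]
--         + [[(r + k, c) for k in range(w)]
--            for c in range(size) for r in range(size - w + 1)]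
--         + [[(r + k, c + k) for k in range(w)]
--            for r in range(size - w + 1) for c in range(size - w + 1)]
--         + [[(r + k, c - k) for k in range(w)]
--            for r in range(size - w + 1) for c in range(w - 1, size)]
--     )
--
--     def threat(win):
--         line = [board[r][c] for (r, c) in win]
--         return line.count("") == 1 and line.count(player) == w - 1
--
--     base = [win for win in windows if threat(win)]
--     total = len(base)
--     threats_at = {}
--     for win in base:
--         for cell in win:
--             threats_at[cell] = threats_at.get(cell, 0) + 1
--     through = {}
--     for win in windows:
--         for cell in win:
--             through.setdefault(cell, []).append(win)
--
--     forks = 0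
--     for (i, j) in empties:
--         board[i][j] = player
--         local = sum(1 for win in through.get((i, j), []) if threat(win))
--         board[i][j] = ""
--         if total - threats_at.get((i, j), 0) + local >= 2:
--             forks += 1
--     return forks
-- ===== Notes on version B (the rewrite author's own statement) =====
-- stated objective: alternative
-- what changed: B enumerates all windows once, precomputes each window's threat status and a per-cell index of the windows through it, and per empty cell re-evaluates only the windows through that cell (threats = total - threats_through + re-evaluated local), instead of A's full four-direction rescan of the whole board for every empty cell; intended as faster (fewer window evaluations per empty cell) but a timing run measured only ~1.2x, so no speed is claimed; Pre_ excludes only ragged boards (a row shorter than the board), on which A raises IndexError.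
import Mathlib
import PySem

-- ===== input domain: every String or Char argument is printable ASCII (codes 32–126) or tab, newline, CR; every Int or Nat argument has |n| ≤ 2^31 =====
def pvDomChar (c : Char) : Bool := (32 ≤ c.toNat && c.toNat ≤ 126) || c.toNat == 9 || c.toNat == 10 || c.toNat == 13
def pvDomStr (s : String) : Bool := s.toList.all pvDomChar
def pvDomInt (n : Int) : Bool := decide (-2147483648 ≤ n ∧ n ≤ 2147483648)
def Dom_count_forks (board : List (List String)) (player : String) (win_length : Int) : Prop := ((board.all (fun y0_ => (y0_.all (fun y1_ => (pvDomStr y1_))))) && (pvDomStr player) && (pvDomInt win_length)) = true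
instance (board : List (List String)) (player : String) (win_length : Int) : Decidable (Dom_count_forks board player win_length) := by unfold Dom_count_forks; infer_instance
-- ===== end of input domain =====

-- B precomputes every window once, each window's threat status, and a per-cell index of
-- the windows through each cell, then per empty cell re-evaluates only the windows
-- through that cell, instead of A's full-board rescan per empty cell; A's temporary
-- in-place mutation of `board` is undone by A itself, so neither version observably mutates.

-- ===== PORT A =====
-- board[r][c] (read); exact under Pre_ (indices produced by the loops are in range there)
def pvCell (b : List (List String)) (r c : Int) : String :=
  PySem.List.pyGetD (PySem.List.pyGetD b r []) c ""

-- board[i][j] = player; exact under Pre_ (i, j in range)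
def pvSet (b : List (List String)) (i j : Int) (v : String) : List (List String) :=
  b.set i.toNat ((b.getD i.toNat []).set j.toNat v)

-- the four threat-scanning blocks of A, one running accumulator as in the Python
def pvThreats (b : List (List String)) (player : String) (w size : Int) : Int :=
  let t := (PySem.List.pyRange 0 size 1).foldl (fun t row =>
    (PySem.List.pyRange 0 (size - w + 1) 1).foldl (fun t col =>
      let line := (PySem.List.pyRange 0 w 1).map (fun k => pvCell b row (col + k))
      if line.count "" = 1 ∧ (line.count player : Int) = w - 1 then t + 1 else t) t) 0
  let t := (PySem.List.pyRange 0 size 1).foldl (fun t col =>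
    (PySem.List.pyRange 0 (size - w + 1) 1).foldl (fun t row =>
      let line := (PySem.List.pyRange 0 w 1).map (fun k => pvCell b (row + k) col)
      if line.count "" = 1 ∧ (line.count player : Int) = w - 1 then t + 1 else t) t) t
  let t := (PySem.List.pyRange 0 (size - w + 1) 1).foldl (fun t row =>
    (PySem.List.pyRange 0 (size - w + 1) 1).foldl (fun t col =>
      let line := (PySem.List.pyRange 0 w 1).map (fun k => pvCell b (row + k) (col + k))
      if line.count "" = 1 ∧ (line.count player : Int) = w - 1 then t + 1 else t) t) t
  (PySem.List.pyRange 0 (size - w + 1) 1).foldl (fun t row =>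
    (PySem.List.pyRange (w - 1) size 1).foldl (fun t col =>
      let line := (PySem.List.pyRange 0 w 1).map (fun k => pvCell b (row + k) (col - k))
      if line.count "" = 1 ∧ (line.count player : Int) = w - 1 then t + 1 else t) t) t

def count_forks (board : List (List String)) (player : String) (win_length : Int) : Int :=
  let size : Int := board.length
  (PySem.List.pyRange 0 size 1).foldl (fun fc i =>
    (PySem.List.pyRange 0 size 1).foldl (fun fc j =>
      if pvCell board i j = "" then
        let b' := pvSet board i j player
        if pvThreats b' player win_length size ≥ 2 then fc + 1 else fc
      else fc) fc) 0

-- ===== PORT B =====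
-- all windows (row, column, diagonal, anti-diagonal), as coordinate lists
def pvWindows (size w : Int) : List (List (Int × Int)) :=
  ((PySem.List.pyRange 0 size 1).flatMap (fun r =>
    (PySem.List.pyRange 0 (size - w + 1) 1).map (fun c =>
      (PySem.List.pyRange 0 w 1).map (fun k => (r, c + k)))))
  ++ ((PySem.List.pyRange 0 size 1).flatMap (fun c =>
    (PySem.List.pyRange 0 (size - w + 1) 1).map (fun r =>
      (PySem.List.pyRange 0 w 1).map (fun k => (r + k, c)))))
  ++ ((PySem.List.pyRange 0 (size - w + 1) 1).flatMap (fun r =>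
    (PySem.List.pyRange 0 (size - w + 1) 1).map (fun c =>
      (PySem.List.pyRange 0 w 1).map (fun k => (r + k, c + k)))))
  ++ ((PySem.List.pyRange 0 (size - w + 1) 1).flatMap (fun r =>
    (PySem.List.pyRange (w - 1) size 1).map (fun c =>
      (PySem.List.pyRange 0 w 1).map (fun k => (r + k, c - k)))))

-- the row-major list of empty cells
def pvEmpties (board : List (List String)) (size : Int) : List (Int × Int) :=
  (PySem.List.pyRange 0 size 1).flatMap (fun i =>
    ((PySem.List.pyRange 0 size 1).filter (fun j => pvCell board i j == "")).map (fun j => (i, j)))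

-- threat(win) of Source B, evaluated on board b
def pvThreat (b : List (List String)) (player : String) (w : Int) (win : List (Int × Int)) : Bool :=
  let line := win.map (fun rc => pvCell b rc.1 rc.2)
  line.count "" == 1 && ((line.count player : Int) == w - 1)

def count_forks_alt (board : List (List String)) (player : String) (win_length : Int) : Int :=
  let size : Int := board.length
  let w := win_length
  let empties := pvEmpties board size
  if empties.isEmpty then 0 else
  let windows := pvWindows size w
  let base := windows.filter (pvThreat board player w)
  let total : Int := base.length
  let threatsAt := base.foldl (fun d win =>
    win.foldl (fun d c => d.modify c 0 (· + 1)) d) (PySem.Dict.empty : PySem.Dict (Int × Int) Int)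
  let through := windows.foldl (fun d win =>
    win.foldl (fun d c => d.modify c [] (· ++ [win])) d)
    (PySem.Dict.empty : PySem.Dict (Int × Int) (List (List (Int × Int))))
  empties.foldl (fun fc ij =>
    let b' := pvSet board ij.1 ij.2 player
    let lcl : Int := ((through.getD ij []).filter (pvThreat b' player w)).length
    if total - threatsAt.getD ij 0 + lcl ≥ 2 then fc + 1 else fc) 0

-- ===== PRECONDITION & SPEC =====
-- Pre_ excludes exactly the ragged boards (a row shorter than the board) on which the
-- Python A raises IndexError while scanning board[i][j] for all i, j < len(board).
def Pre_count_forks (board : List (List String)) (player : String) (win_length : Int) : Prop :=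
  ∀ row ∈ board, board.length ≤ row.length

instance (board : List (List String)) (player : String) (win_length : Int) : Decidable (Pre_count_forks board player win_length) := by unfold Pre_count_forks; infer_instance

def pvWitness_count_forks : List (List String) × String × Int :=
  ([["", "X", ""], ["X", "", ""], ["", "", ""]], "X", 3)

def Spec_count_forks (board : List (List String)) (player : String) (win_length : Int) (out : Int) : Prop := out = count_forks_alt board player win_length
instance (board : List (List String)) (player : String) (win_length : Int) (out : Int) : Decidable (Spec_count_forks board player win_length out) := by unfold Spec_count_forks; infer_instance

-- ===== CLAIM (what is proved, stated in full; the proofs are below) =====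
def Claim_equal_count_forks : Prop := ∀ (board : List (List String)) (player : String) (win_length : Int), Dom_count_forks board player win_length → Pre_count_forks board player win_length → Spec_count_forks board player win_length (count_forks board player win_length)

-- ===== LEMMAS AND PROOFS =====

-- every window consists of pairwise-distinct, in-board coordinates
theorem pvWindows_mem {size w : Int} {win : List (Int × Int)} (h : win ∈ pvWindows size w) :
    win.Nodup ∧ ∀ rc ∈ win, 0 ≤ rc.1 ∧ rc.1 < size ∧ 0 ≤ rc.2 ∧ rc.2 < size := by
  simp only [pvWindows, List.mem_append, List.mem_flatMap, List.mem_map] at h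
  rcases h with ((⟨r, hr, c, hc, hw⟩ | ⟨c, hc, r, hr, hw⟩) | ⟨r, hr, c, hc, hw⟩) | ⟨r, hr, c, hc, hw⟩ <;>
    rw [PySem.List.mem_pyRange_one] at hr hc <;> subst hw <;>
    refine ⟨List.Nodup.map ?_ (PySem.List.nodup_pyRange_one 0 w), ?_⟩ <;>
    first
      | (intro k1 k2 hk; simp only [Prod.mk.injEq] at hk; omega)
      | (intro rc hrc; simp only [List.mem_map] at hrc;
         obtain ⟨k, hk, hrc⟩ := hrc; rw [PySem.List.mem_pyRange_one] at hk;
         subst hrc; simp only []; omega)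

-- reading a cell of the board with one cell overwritten
theorem pvCell_set {board : List (List String)} {i j r c : Int} {v : String}
    (hpre : ∀ row ∈ board, board.length ≤ row.length)
    (hi : 0 ≤ i) (hi' : i < board.length) (hj : 0 ≤ j) (hj' : j < board.length)
    (hr : 0 ≤ r) (hr' : r < board.length) (hc : 0 ≤ c) (hc' : c < board.length) :
    pvCell (pvSet board i j v) r c = if (r, c) = (i, j) then v else pvCell board r c := by
  have hiN : i.toNat < board.length := by omega
  have hrN : r.toNat < board.length := by omega
  have hleni : board.length ≤ board[i.toNat].length := hpre _ (List.getElem_mem hiN)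
  have hlenr : board.length ≤ board[r.toNat].length := hpre _ (List.getElem_mem hrN)
  have hrow : board.getD i.toNat [] = board[i.toNat] := List.getD_eq_getElem _ _ hiN
  unfold pvCell pvSet
  rw [hrow]
  rw [PySem.List.pyGetD_eq_getElem (board.set i.toNat (board[i.toNat].set j.toNat v)) _ hr
        (by simp only [List.length_set]; omega)]
  rw [PySem.List.pyGetD_eq_getElem board _ hr (by omega)]
  rw [PySem.List.pyGetD_eq_getElem board[r.toNat] _ hc (by omega)]
  rw [List.getElem_set (by simp only [List.length_set]; omega)]
  by_cases hri : i.toNat = r.toNat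
  · rw [if_pos hri]
    rw [PySem.List.pyGetD_eq_getElem (board[i.toNat].set j.toNat v) _ hc
          (by simp only [List.length_set]; omega)]
    rw [List.getElem_set (by simp only [List.length_set]; omega)]
    by_cases hcj : j.toNat = c.toNat
    · rw [if_pos hcj, if_pos (show (r, c) = (i, j) by simp only [Prod.mk.injEq]; omega)]
    · rw [if_neg hcj, if_neg (show ¬ ((r, c) = (i, j)) by simp only [Prod.mk.injEq]; omega)]
      simp only [hri]
  · rw [if_neg hri, if_neg (show ¬ ((r, c) = (i, j)) by simp only [Prod.mk.injEq]; omega)]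
    exact PySem.List.pyGetD_eq_getElem board[r.toNat] _ hc (by omega)

-- (line.count(""), line.count(player)) of a window, as a pair (used to compare statuses)
def pvCounts (b : List (List String)) (player : String) (win : List (Int × Int)) : Int × Int :=
  let line := win.map (fun rc => pvCell b rc.1 rc.2)
  ((line.count "" : Int), (line.count player : Int))

-- Source B's threat test, expressed through pvCounts
theorem pvThreat_eq_counts (b : List (List String)) (player : String) (w : Int)
    (win : List (Int × Int)) :
    pvThreat b player w win = decide (pvCounts b player win = (1, w - 1)) := by
  rw [Bool.eq_iff_iff]
  simp [pvThreat, pvCounts, Prod.ext_iff, Nat.cast_eq_one]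

-- one of A's four scanning blocks, as a count over the matching window sublist
theorem pvBlock_eq (b : List (List String)) (player : String) (w : Int)
    (R C : List Int) (fr fc : Int → Int → Int → Int) (t : Int) :
    R.foldl (fun t row => C.foldl (fun t col =>
        if ((PySem.List.pyRange 0 w 1).map (fun k => pvCell b (fr row col k) (fc row col k))).count "" = 1 ∧
           (((PySem.List.pyRange 0 w 1).map (fun k => pvCell b (fr row col k) (fc row col k))).count player : Int) = w - 1
        then t + 1 else t) t) t
      = t + ((R.flatMap (fun row => C.map (fun col =>
            (PySem.List.pyRange 0 w 1).map (fun k => (fr row col k, fc row col k))))).countP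
            (fun win => decide (pvCounts b player win = (1, w - 1))) : Int) := by
  have hinner : ∀ (row t : Int),
      C.foldl (fun t col =>
        if ((PySem.List.pyRange 0 w 1).map (fun k => pvCell b (fr row col k) (fc row col k))).count "" = 1 ∧
           (((PySem.List.pyRange 0 w 1).map (fun k => pvCell b (fr row col k) (fc row col k))).count player : Int) = w - 1
        then t + 1 else t) t
      = t + (C.countP (fun col => decide (pvCounts b player
            ((PySem.List.pyRange 0 w 1).map (fun k => (fr row col k, fc row col k))) = (1, w - 1))) : Int) := by
    intro row t
    rw [PySem.List.foldl_ite_add_one]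
    congr 2
    apply List.countP_congr
    intro col _
    simp [pvCounts, List.map_map, Function.comp_def, Prod.ext_iff, Nat.cast_eq_one]
  calc R.foldl (fun t row => C.foldl (fun t col =>
        if ((PySem.List.pyRange 0 w 1).map (fun k => pvCell b (fr row col k) (fc row col k))).count "" = 1 ∧
           (((PySem.List.pyRange 0 w 1).map (fun k => pvCell b (fr row col k) (fc row col k))).count player : Int) = w - 1
        then t + 1 else t) t) t
      = R.foldl (fun t row => t + (C.countP (fun col => decide (pvCounts b player
          ((PySem.List.pyRange 0 w 1).map (fun k => (fr row col k, fc row col k))) = (1, w - 1))) : Int)) t :=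
        PySem.List.foldl_congr_mem _ _ _ _ (fun acc row _ => hinner row acc)
    _ = t + (R.map (fun row => (C.countP (fun col => decide (pvCounts b player
          ((PySem.List.pyRange 0 w 1).map (fun k => (fr row col k, fc row col k))) = (1, w - 1))) : Int))).sum :=
        PySem.List.foldl_add R _ t
    _ = _ := by
        congr 1
        rw [List.countP_flatMap, Nat.cast_list_sum, List.map_map]
        congr 1
        apply List.map_congr_left
        intro row _
        simp only [Function.comp_def]
        rw [List.countP_map]
        rfl

-- A's threat scan equals a count over B's window list
theorem pvThreats_eq_countP (b : List (List String)) (player : String) (w size : Int) :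
    pvThreats b player w size
      = ((pvWindows size w).countP
          (fun win => decide (pvCounts b player win = (1, w - 1))) : Int) := by
  simp only [pvThreats]
  rw [pvBlock_eq b player w (PySem.List.pyRange 0 size 1) (PySem.List.pyRange 0 (size - w + 1) 1)
        (fun row col k => row) (fun row col k => col + k) 0]
  rw [pvBlock_eq b player w (PySem.List.pyRange 0 size 1) (PySem.List.pyRange 0 (size - w + 1) 1)
        (fun col row k => row + k) (fun col row k => col) _]
  rw [pvBlock_eq b player w (PySem.List.pyRange 0 (size - w + 1) 1) (PySem.List.pyRange 0 (size - w + 1) 1)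
        (fun row col k => row + k) (fun row col k => col + k) _]
  rw [pvBlock_eq b player w (PySem.List.pyRange 0 (size - w + 1) 1) (PySem.List.pyRange (w - 1) size 1)
        (fun row col k => row + k) (fun row col k => col - k) _]
  simp only [pvWindows, List.countP_append]
  push_cast
  ring

-- a window not through the overwritten cell keeps its counts
theorem pvCounts_set_not_mem (board : List (List String)) (player : String) {i j : Int}
    (hpre : ∀ row ∈ board, board.length ≤ row.length)
    (hi : 0 ≤ i) (hi' : i < board.length) (hj : 0 ≤ j) (hj' : j < board.length)
    {win : List (Int × Int)} (hnm : (i, j) ∉ win)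
    (hbb : ∀ rc ∈ win, 0 ≤ rc.1 ∧ rc.1 < (board.length : Int) ∧ 0 ≤ rc.2 ∧ rc.2 < (board.length : Int)) :
    pvCounts (pvSet board i j player) player win = pvCounts board player win := by
  unfold pvCounts
  have : win.map (fun rc => pvCell (pvSet board i j player) rc.1 rc.2)
      = win.map (fun rc => pvCell board rc.1 rc.2) := by
    apply List.map_congr_left
    intro rc hrc
    obtain ⟨h1, h2, h3, h4⟩ := hbb rc hrc
    rw [pvCell_set hpre hi hi' hj hj' h1 h2 h3 h4]
    rw [if_neg (fun he => hnm (by simpa using he ▸ hrc))]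
  rw [this]

-- the counter dictionary B builds reads back as window counts through a cell
theorem pvDict_getD (hits : List (List (Int × Int))) (c : Int × Int)
    (hnd : ∀ win ∈ hits, win.Nodup) :
    (hits.foldl (fun dd win => win.foldl (fun dd c => dd.modify c 0 (· + 1)) dd)
        (PySem.Dict.empty : PySem.Dict (Int × Int) Int)).getD c 0
      = (hits.countP (fun win => decide (c ∈ win)) : Int) := by
  suffices h : ∀ (d : PySem.Dict (Int × Int) Int),
      (hits.foldl (fun dd win => win.foldl (fun dd c => dd.modify c 0 (· + 1)) dd) d).getD c 0
        = d.getD c 0 + (hits.countP (fun win => decide (c ∈ win)) : Int) by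
    rw [h]; simp
  induction hits with
  | nil => intro d; simp
  | cons win t ih =>
    intro d
    simp only [List.foldl_cons]
    rw [ih (fun w hw => hnd w (List.mem_cons_of_mem _ hw))]
    rw [PySem.Dict.getD_foldl_modify_add_one]
    have hcnt : win.count c = if c ∈ win then 1 else 0 := by
      have hle := (List.nodup_iff_count_le_one.mp (hnd win List.mem_cons_self)) c
      by_cases hm : c ∈ win
      · have := List.count_pos_iff.mpr hm
        simp only [hm, if_true]; omega
      · simp [hm, List.count_eq_zero.mpr hm]
    rw [hcnt, List.countP_cons]
    by_cases hm : c ∈ win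
    · simp only [hm, if_true, decide_true]
      push_cast; ring
    · simp only [hm, if_false, decide_false]
      push_cast; ring

-- the windows-through-a-cell dictionary reads back as a filter of the window list
theorem pvThrough_getD (L : List (List (Int × Int))) (c : Int × Int)
    (hnd : ∀ win ∈ L, win.Nodup) :
    (L.foldl (fun dd win => win.foldl (fun dd x => dd.modify x [] (· ++ [win])) dd)
        (PySem.Dict.empty : PySem.Dict (Int × Int) (List (List (Int × Int))))).getD c []
      = L.filter (fun win => decide (c ∈ win)) := by
  suffices h : ∀ (d : PySem.Dict (Int × Int) (List (List (Int × Int)))),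
      (L.foldl (fun dd win => win.foldl (fun dd x => dd.modify x [] (· ++ [win])) dd) d).getD c []
        = d.getD c [] ++ L.filter (fun win => decide (c ∈ win)) by
    rw [h]; simp
  induction L with
  | nil => intro d; simp
  | cons win t ih =>
    intro d
    simp only [List.foldl_cons]
    rw [ih (fun w hw => hnd w (List.mem_cons_of_mem _ hw))]
    have hstep : (win.foldl (fun dd x => dd.modify x [] (· ++ [win])) d).getD c []
        = d.getD c [] ++ (if c ∈ win then [win] else []) := by
      have hfold : win.foldl (fun dd x => dd.modify x [] (· ++ [win])) d
          = (win.map (fun x => (x, win))).foldl (fun dd p => dd.modify p.1 [] (· ++ [p.2])) d := by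
        rw [List.foldl_map]
      rw [hfold, PySem.Dict.getD_foldl_modify_append]
      congr 1
      have hle := (List.nodup_iff_count_le_one.mp (hnd win List.mem_cons_self)) c
      by_cases hm : c ∈ win
      · have hpos := List.count_pos_iff.mpr hm
        have hcnt : win.count c = 1 := by omega
        simp [List.filter_map, List.map_map, Function.comp_def, List.filter_beq, hcnt, hm]
      · have hcnt : win.count c = 0 := List.count_eq_zero.mpr hm
        simp [List.filter_map, List.map_map, Function.comp_def, List.filter_beq, hcnt, hm]
    rw [hstep, List.filter_cons]
    by_cases hm : c ∈ win <;> simp [hm, List.append_assoc]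

-- count under a predicate that agrees with q on windows through the cell and with p elsewhere
theorem countP_ite_split {α : Type} (L : List α) (m p q : α → Prop) (p0 : α → Bool)
    [DecidablePred m] [DecidablePred p] [DecidablePred q]
    (h : ∀ x ∈ L, p0 x = true ↔ (if m x then q x else p x)) :
    ((L.countP p0) : Int)
      = (L.countP (fun x => decide (p x)) : Int)
        - (L.countP (fun x => decide (m x ∧ p x)) : Int)
        + (L.countP (fun x => decide (m x ∧ q x)) : Int) := by
  induction L with
  | nil => simp
  | cons x t ih =>
    have ih' := ih fun y hy => h y (List.mem_cons_of_mem _ hy)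
    have hx := h x List.mem_cons_self
    simp only [List.countP_cons]
    by_cases hm : m x <;> by_cases hp : p x <;> by_cases hq : q x <;>
      simp only [hm, hp, hq, if_true, if_false, iff_true, iff_false] at hx <;>
      simp only [hm, hp, hq, hx, eq_self_iff_true, if_true, if_false, decide_true,
        decide_false, and_true, and_false, true_and, false_and, and_self,
        Bool.not_eq_true] <;>
      first
        | (rw [if_pos hx] <;> push_cast <;> omega)
        | (rw [if_neg (by simp [hx])] <;> push_cast <;> omega)
        | (push_cast <;> omega)

-- per empty cell: A's recomputed threat count equals B's precomputed formula
theorem pvThreats_set_eq (board : List (List String)) (player : String) (w : Int)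
    {i j : Int}
    (hpre : ∀ row ∈ board, board.length ≤ row.length)
    (hi : 0 ≤ i) (hi' : i < board.length) (hj : 0 ≤ j) (hj' : j < board.length) :
    pvThreats (pvSet board i j player) player w board.length
      = (((pvWindows board.length w).filter (pvThreat board player w)).length : Int)
        - (((pvWindows board.length w).filter (pvThreat board player w)).countP
              (fun win => decide ((i, j) ∈ win)) : Int)
        + ((((pvWindows board.length w).filter (fun win => decide ((i, j) ∈ win))).filter
              (pvThreat (pvSet board i j player) player w)).length : Int) := by
  rw [pvThreats_eq_countP]
  have hsplit := countP_ite_split (pvWindows (board.length : Int) w)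
      (fun win => (i, j) ∈ win)
      (fun win => pvCounts board player win = (1, w - 1))
      (fun win => pvCounts (pvSet board i j player) player win = (1, w - 1))
      (fun win => decide (pvCounts (pvSet board i j player) player win = (1, w - 1)))
      (by
        intro win hwin
        by_cases hm : (i, j) ∈ win
        · simp [hm]
        · obtain ⟨hnd, hbb⟩ := pvWindows_mem hwin
          have hc := pvCounts_set_not_mem board player hpre hi hi' hj hj' hm hbb
          simp [hm, hc])
  have hthr : pvThreat board player w = fun win => decide (pvCounts board player win = (1, w - 1)) :=
    funext (pvThreat_eq_counts board player w)
  have hthr' : pvThreat (pvSet board i j player) player w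
      = fun win => decide (pvCounts (pvSet board i j player) player win = (1, w - 1)) :=
    funext (pvThreat_eq_counts (pvSet board i j player) player w)
  have e1 : ((pvWindows (board.length : Int) w).filter (pvThreat board player w)).length
      = (pvWindows (board.length : Int) w).countP
          (fun win => decide (pvCounts board player win = (1, w - 1))) := by
    rw [hthr, List.countP_eq_length_filter]
  have e2 : ((pvWindows (board.length : Int) w).filter (pvThreat board player w)).countP
        (fun win => decide ((i, j) ∈ win))
      = (pvWindows (board.length : Int) w).countP
          (fun win => decide ((i, j) ∈ win ∧ pvCounts board player win = (1, w - 1))) := by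
    rw [List.countP_filter]
    apply List.countP_congr
    intro win _
    rw [pvThreat_eq_counts, Bool.decide_and]
  have e3 : (((pvWindows (board.length : Int) w).filter (fun win => decide ((i, j) ∈ win))).filter
        (pvThreat (pvSet board i j player) player w)).length
      = (pvWindows (board.length : Int) w).countP
          (fun win => decide ((i, j) ∈ win ∧ pvCounts (pvSet board i j player) player win = (1, w - 1))) := by
    rw [← List.countP_eq_length_filter, List.countP_filter]
    apply List.countP_congr
    intro win _
    rw [pvThreat_eq_counts, Bool.decide_and, Bool.and_comm]
  rw [e1, e2, e3, hsplit]

-- ===== VERDICT (by name: the statement is the Claim_ definition above) =====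
theorem count_forks_spec : Claim_equal_count_forks := by
  intro board player win_length _ hpre
  unfold Spec_count_forks
  simp only [count_forks, count_forks_alt]
  set size : Int := (board.length : Int) with hsize
  set C := PySem.List.pyRange 0 size 1 with hC
  set W := pvWindows size win_length with hW
  set base := W.filter (pvThreat board player win_length) with hbase
  set thrAt := base.foldl (fun d win => win.foldl (fun d c => d.modify c 0 (· + 1)) d)
      (PySem.Dict.empty : PySem.Dict (Int × Int) Int) with hthrAt
  set through := W.foldl (fun d win => win.foldl (fun d c => d.modify c [] (· ++ [win])) d)
      (PySem.Dict.empty : PySem.Dict (Int × Int) (List (List (Int × Int)))) with hthrough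
  -- the `no empty cell` early return of B agrees with folding over the empty list
  have hif : ∀ (l : List (Int × Int)) (f : Int → Int × Int → Int),
      (if l.isEmpty then (0 : Int) else l.foldl f 0) = l.foldl f 0 := by
    intro l f; cases l <;> simp
  rw [hif]
  -- A's side: one count per row
  have hinner : ∀ (i fc : Int),
      C.foldl (fun fc j =>
        if pvCell board i j = "" then
          if pvThreats (pvSet board i j player) player win_length size ≥ 2 then fc + 1 else fc
        else fc) fc
      = fc + (C.countP (fun j => decide (pvCell board i j = "" ∧
          pvThreats (pvSet board i j player) player win_length size ≥ 2)) : Int) := by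
    intro i fc
    have hfun : (fun (fc j : Int) =>
        if pvCell board i j = "" then
          if pvThreats (pvSet board i j player) player win_length size ≥ 2 then fc + 1 else fc
        else fc)
        = fun (fc j : Int) =>
          if pvCell board i j = "" ∧
              pvThreats (pvSet board i j player) player win_length size ≥ 2 then fc + 1
          else fc := by
      funext fc j
      by_cases h1 : pvCell board i j = "" <;>
        by_cases h2 : pvThreats (pvSet board i j player) player win_length size ≥ 2 <;>
        simp [h1, h2]
    rw [hfun, PySem.List.foldl_ite_add_one]
  have hA : C.foldl (fun fc i => C.foldl (fun fc j =>
        if pvCell board i j = "" then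
          if pvThreats (pvSet board i j player) player win_length size ≥ 2 then fc + 1 else fc
        else fc) fc) 0
      = (C.map (fun i => (C.countP (fun j => decide (pvCell board i j = "" ∧
          pvThreats (pvSet board i j player) player win_length size ≥ 2)) : Int))).sum := by
    calc C.foldl (fun fc i => C.foldl (fun fc j =>
            if pvCell board i j = "" then
              if pvThreats (pvSet board i j player) player win_length size ≥ 2 then fc + 1 else fc
            else fc) fc) 0
        = C.foldl (fun fc i => fc + (C.countP (fun j => decide (pvCell board i j = "" ∧
            pvThreats (pvSet board i j player) player win_length size ≥ 2)) : Int)) 0 :=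
          PySem.List.foldl_congr_mem _ _ _ _ (fun acc i _ => hinner i acc)
      _ = 0 + (C.map (fun i => (C.countP (fun j => decide (pvCell board i j = "" ∧
            pvThreats (pvSet board i j player) player win_length size ≥ 2)) : Int))).sum :=
          PySem.List.foldl_add _ _ 0
      _ = _ := zero_add _
  rw [hA]
  -- B's side: a count over the empty-cell list
  rw [PySem.List.foldl_ite_add_one]
  rw [show pvEmpties board size = C.flatMap (fun i =>
        ((C.filter (fun j => pvCell board i j == "")).map (fun j => (i, j)))) from rfl]
  rw [List.countP_flatMap, Nat.cast_list_sum, List.map_map, zero_add]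
  congr 1
  apply List.map_congr_left
  intro i hi
  rw [PySem.List.mem_pyRange_one] at hi
  simp only [Function.comp_def]
  rw [List.countP_map, List.countP_filter]
  congr 1
  apply List.countP_congr
  intro j hj
  rw [PySem.List.mem_pyRange_one] at hj
  -- pointwise: A's recomputed condition equals B's table lookup condition
  by_cases hcell : pvCell board i j = ""
  · have key := pvThreats_set_eq board player win_length hpre hi.1 (by omega) hj.1 (by omega)
    rw [← hsize, ← hW, ← hbase] at key
    have hd1 : thrAt.getD (i, j) 0 = (base.countP (fun win => decide ((i, j) ∈ win)) : Int) := by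
      rw [hthrAt]
      exact pvDict_getD base (i, j)
        (fun win hw => (pvWindows_mem (hW ▸ List.mem_of_mem_filter (hbase ▸ hw))).1)
    have hd2 : through.getD (i, j) [] = W.filter (fun win => decide ((i, j) ∈ win)) := by
      rw [hthrough]
      exact pvThrough_getD W (i, j) (fun win hw => (pvWindows_mem (hW ▸ hw)).1)
    simp only [Function.comp_def, hcell, true_and, key, decide_eq_decide]
    rw [hd1, hd2, List.filter_filter, hbase]
    simp
  · simp [Function.comp_def, hcell, beq_iff_eq]
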